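-- pv_equiv track=rewrite | github.com/cassiobatista/vast3 | gui/words_per_loc_bar.py | get_freq_range
-- ===== SOURCE A (Python) =====
-- NUM_WORDS = 10
--
-- def get_freq_range(word_count):
--     frequencies = []
--     for wordcountdict in word_count.values():
--         wordfreqlist = sorted(wordcountdict.items(),
--                     key=lambda kv: kv[1], reverse=True)
--         for word, freq in wordfreqlist[:NUM_WORDS]:
--             frequencies.append(freq)
--     return min(frequencies), max(frequencies)
-- ===== SOURCE B (Python) =====
-- NUM_WORDS = 10
--
-- def get_freq_range(word_count):
--     # max: global flat scan, no sorting (every location's top-10 contains its max)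
--     max_result = max(freq for d in word_count.values() for freq in d.values())
--     # min: per nonempty location, the smallest of its top-10 = 10th-largest value
--     # (or its overall minimum when it has fewer than 10 words), reduced with min
--     min_result = min(sorted(d.values(), reverse=True)[:NUM_WORDS][-1]
--                      for d in word_count.values() if d)
--     return min_result, max_result
-- ===== Notes on version B (the rewrite author's own statement) =====
-- stated objective: alternative
-- what changed: A sorts each location's (word,freq) items, gathers every location's top-10 frequencies into one flat list and takes min and max of it; B never builds that list: it computes the max by one flat scan over all raw frequencies (no sorting), and the min by reducing per-location 'smallest of the top-10 frequencies' candidates (last of the sorted-descending value list's first 10) with min over the nonempty locations.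
import Mathlib
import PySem

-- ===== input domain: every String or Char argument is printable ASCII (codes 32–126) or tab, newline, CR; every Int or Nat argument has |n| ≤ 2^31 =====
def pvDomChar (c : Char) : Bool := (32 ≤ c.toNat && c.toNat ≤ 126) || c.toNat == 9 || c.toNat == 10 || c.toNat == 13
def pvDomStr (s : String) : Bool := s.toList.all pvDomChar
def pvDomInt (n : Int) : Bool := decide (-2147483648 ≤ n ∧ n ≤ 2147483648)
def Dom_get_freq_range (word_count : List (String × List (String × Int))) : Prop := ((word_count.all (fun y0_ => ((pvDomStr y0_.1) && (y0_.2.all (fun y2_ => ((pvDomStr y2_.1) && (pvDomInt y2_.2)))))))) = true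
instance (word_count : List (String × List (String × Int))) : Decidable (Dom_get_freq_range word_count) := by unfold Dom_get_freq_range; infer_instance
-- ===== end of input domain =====

-- B computes the max by one flat scan over all frequencies and the min by reducing the
-- per-location "smallest of the top-10 frequencies" values, instead of A's sort-each-location,
-- collect-every-top-10-frequency-into-one-flat-list, then min and max of that list (objective: alternative).

-- ===== PORT A =====
def get_freq_range (word_count : List (String × List (String × Int))) : Int × Int :=
  let frequencies : List Int :=
    (PySem.Dict.ofList word_count).values.foldl
      (fun frequencies wordcountdict =>
        let wordfreqlist :=
          PySem.List.sorted (PySem.Dict.ofList wordcountdict).items (fun kv => kv.2) true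
        (PySem.List.slice wordfreqlist none (some 10)).foldl
          (fun fs p => fs ++ [p.2]) frequencies)
      []
  -- min/max of an empty sequence raises ValueError in Python: excluded by Pre_ (.getD 0 is unreached inside Pre_)
  ((PySem.List.min? frequencies (fun x => x)).getD 0,
   (PySem.List.max? frequencies (fun x => x)).getD 0)

def get_freq_range_alt (word_count : List (String × List (String × Int))) : Int × Int :=
  let dicts := PySem.Dict.values (PySem.Dict.ofList word_count)
  -- max(freq for d in word_count.values() for freq in d.values()); empty → ValueError, excluded by Pre_
  let max_result :=
    (PySem.List.max? (dicts.flatMap (fun d => PySem.Dict.values (PySem.Dict.ofList d)))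
      (fun x => x)).getD 0
  -- min(sorted(d.values(), reverse=True)[:NUM_WORDS][-1] for d in word_count.values() if d)
  -- ('if d' tests the inner dict for nonemptiness, which holds iff its association list is nonempty)
  let mins :=
    (dicts.filter (fun d => !d.isEmpty)).map (fun d =>
      (PySem.List.pyGet?
        (PySem.List.slice
          (PySem.List.sorted (PySem.Dict.values (PySem.Dict.ofList d)) (fun x => x) true)
          none (some 10))
        (-1)).getD 0)
  let min_result := (PySem.List.min? mins (fun x => x)).getD 0
  (min_result, max_result)


-- ===== PRECONDITION & SPEC =====
-- Pre_ excludes exactly the inputs where Python raises ValueError (min/max of an empty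
-- sequence): it requires some location to have a nonempty word dict; both A and B raise there.
def Pre_get_freq_range (word_count : List (String × List (String × Int))) : Prop :=
  ∃ d ∈ PySem.Dict.values (PySem.Dict.ofList word_count), d ≠ []
instance (word_count : List (String × List (String × Int))) : Decidable (Pre_get_freq_range word_count) := by unfold Pre_get_freq_range; infer_instance
def pvWitness_get_freq_range : (List (String × List (String × Int))) := [("loc", [("word", 3)])]

def Spec_get_freq_range (word_count : List (String × List (String × Int))) (out : Int × Int) : Prop := out = get_freq_range_alt word_count
instance (word_count : List (String × List (String × Int))) (out : Int × Int) : Decidable (Spec_get_freq_range word_count out) := by unfold Spec_get_freq_range; infer_instance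

-- ===== CLAIM (what is proved, stated in full; the proofs are below) =====
def Claim_equal_get_freq_range : Prop := ∀ (word_count : List (String × List (String × Int))), Dom_get_freq_range word_count → Pre_get_freq_range word_count → Spec_get_freq_range word_count (get_freq_range word_count)

-- ===== LEMMAS AND PROOFS =====

theorem pv_map_snd_sorted (l : List (String × Int)) :
    (PySem.List.sorted l (fun kv => kv.2) true).map Prod.snd
      = PySem.List.sorted (l.map Prod.snd) (fun x => x) true := by
  apply PySem.List.eq_of_perm_of_pairwise_le_of_injective (key := fun x : Int => -x)
    (fun a b h => by simpa using h)
  · exact ((PySem.List.sorted_perm l _ true).map Prod.snd).trans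
      ((PySem.List.sorted_perm (l.map Prod.snd) _ true).symm)
  · have := PySem.List.sorted_pairwise_rev l (fun kv => kv.2)
    exact (this.map Prod.snd (by intro a b h; simpa using h))
  · have := PySem.List.sorted_pairwise_rev (l.map Prod.snd) (fun x => x)
    exact this.imp (by intro a b h; simpa using h)

theorem pv_max_congr (xs ys : List Int)
    (h1 : ∀ x ∈ xs, ∃ y ∈ ys, x ≤ y) (h2 : ∀ y ∈ ys, ∃ x ∈ xs, y ≤ x) :
    PySem.List.max? xs (fun v => v) = PySem.List.max? ys (fun v => v) := by
  cases hx : PySem.List.max? xs (fun v => v) with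
  | none =>
    rw [PySem.List.max?_eq_none_iff] at hx
    subst hx
    symm
    rw [PySem.List.max?_eq_none_iff]
    cases hy : ys with
    | nil => rfl
    | cons y t => exact absurd (h2 y (by simp [hy])) (by simp)
  | some m =>
    cases hy : PySem.List.max? ys (fun v => v) with
    | none =>
      rw [PySem.List.max?_eq_none_iff] at hy
      subst hy
      exact absurd (h1 m (PySem.List.max?_mem hx)) (by simp)
    | some m' =>
      obtain ⟨y, hyy, hmy⟩ := h1 m (PySem.List.max?_mem hx)
      obtain ⟨x, hxx, hmx⟩ := h2 m' (PySem.List.max?_mem hy)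
      have h3 := PySem.List.max?_isMax hy y hyy
      have h4 := PySem.List.max?_isMax hx x hxx
      simp only [Option.some.injEq] at *
      omega

theorem pv_min_congr (xs ys : List Int)
    (h1 : ∀ x ∈ xs, ∃ y ∈ ys, y ≤ x) (h2 : ∀ y ∈ ys, ∃ x ∈ xs, x ≤ y) :
    PySem.List.min? xs (fun v => v) = PySem.List.min? ys (fun v => v) := by
  cases hx : PySem.List.min? xs (fun v => v) with
  | none =>
    rw [PySem.List.min?_eq_none_iff] at hx
    subst hx
    symm
    rw [PySem.List.min?_eq_none_iff]
    cases hy : ys with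
    | nil => rfl
    | cons y t => exact absurd (h2 y (by simp [hy])) (by simp)
  | some m =>
    cases hy : PySem.List.min? ys (fun v => v) with
    | none =>
      rw [PySem.List.min?_eq_none_iff] at hy
      subst hy
      exact absurd (h1 m (PySem.List.min?_mem hx)) (by simp)
    | some m' =>
      obtain ⟨y, hyy, hmy⟩ := h1 m (PySem.List.min?_mem hx)
      obtain ⟨x, hxx, hmx⟩ := h2 m' (PySem.List.min?_mem hy)
      have h3 := PySem.List.min?_isMin hy y hyy
      have h4 := PySem.List.min?_isMin hx x hxx
      simp only [Option.some.injEq] at *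
      omega

theorem pv_getLast_le (l : List Int) (hl : l.Pairwise (fun a b => b ≤ a)) :
    ∀ y ∈ l, l.getLast?.getD 0 ≤ y := by
  induction l with
  | nil => simp
  | cons x t ih =>
    rcases List.pairwise_cons.mp hl with ⟨hx, ht⟩
    intro y hy
    cases t with
    | nil => simp_all
    | cons a s =>
      have h1 := ih ht
      rcases List.mem_cons.mp hy with rfl | hyt
      · have ha := h1 a (by simp)
        have := hx a (by simp)
        simp only [List.getLast?_cons_cons] at *
        omega
      · simpa using h1 y hyt

theorem pv_items_update_ne_nil (ps : List (String × Int)) (d : PySem.Dict String Int)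
    (h : d.items ≠ []) : (d.update ps).items ≠ [] := by
  induction ps generalizing d with
  | nil => simpa [PySem.Dict.update]
  | cons p t ih =>
    have h2 : (d.insert p.1 p.2).items ≠ [] := by
      rw [PySem.Dict.items_insert]
      split
      · simpa
      · simp
    have : d.update (p :: t) = (d.insert p.1 p.2).update t := by
      simp [PySem.Dict.update]
    rw [this]
    exact ih _ h2

theorem pv_values_ofList_ne_nil (d : List (String × Int)) (h : d ≠ []) :
    (PySem.Dict.ofList d).values ≠ [] := by
  cases d with
  | nil => simp at h
  | cons p t =>
    have : PySem.Dict.ofList (p :: t) = (PySem.Dict.empty.insert p.1 p.2).update t := by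
      simp [PySem.Dict.ofList, PySem.Dict.update]
    have h0 : (PySem.Dict.empty.insert p.1 p.2).items ≠ [] := by
      rw [PySem.Dict.items_insert, if_neg (by simp [PySem.Dict.contains_empty])]
      simp
    rw [PySem.Dict.values, this]
    intro hc
    exact pv_items_update_ne_nil t _ h0 (by simpa using hc)

def pvSvals (d : List (String × Int)) : List Int :=
  PySem.List.sorted (PySem.Dict.values (PySem.Dict.ofList d)) (fun x => x) true

def pvTop (d : List (String × Int)) : List Int := (pvSvals d).take 10

theorem pvTop_pairwise (d : List (String × Int)) :
    (pvTop d).Pairwise (fun a b => b ≤ a) :=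
  (PySem.List.sorted_pairwise_rev _ (fun x : Int => x)).sublist (List.take_sublist _ _)

theorem pvTop_subset (d : List (String × Int)) : ∀ x ∈ pvTop d, x ∈ (PySem.Dict.ofList d).values := by
  intro x hx
  have : x ∈ pvSvals d := (List.take_sublist _ _).mem hx
  exact (PySem.List.mem_sorted _ _ _ x).mp this

theorem pvTop_ne_nil (d : List (String × Int)) (h : d ≠ []) : pvTop d ≠ [] := by
  have hv := pv_values_ofList_ne_nil d h
  have : pvSvals d ≠ [] := by
    simpa [pvSvals, PySem.List.sorted_eq_nil_iff] using hv
  simpa [pvTop, List.take_eq_nil_iff] using this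

-- A's frequency list, named
theorem pv_A_eq (word_count : List (String × List (String × Int))) :
    get_freq_range word_count =
      ((PySem.List.min? ((PySem.Dict.ofList word_count).values.flatMap pvTop) (fun x => x)).getD 0,
       (PySem.List.max? ((PySem.Dict.ofList word_count).values.flatMap pvTop) (fun x => x)).getD 0) := by
  unfold get_freq_range
  have hbody : ∀ (acc : List Int) (d : List (String × Int)), d ∈ (PySem.Dict.ofList word_count).values →
      (PySem.List.slice (PySem.List.sorted (PySem.Dict.ofList d).items (fun kv => kv.2) true)
          none (some 10)).foldl (fun fs p => fs ++ [p.2]) acc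
        = acc ++ pvTop d := by
    intro acc d _
    rw [PySem.List.slice_to _ (by norm_num), PySem.List.foldl_append_singleton_eq_map]
    congr 1
    rw [List.map_take, pv_map_snd_sorted]
    rfl
  dsimp only
  have hfold := PySem.List.foldl_congr_mem
    (f := fun frequencies wordcountdict => List.foldl (fun fs p => fs ++ [p.2]) frequencies
      (PySem.List.slice (PySem.List.sorted (PySem.Dict.ofList wordcountdict).items (fun kv => kv.2) true)
        none (some 10)))
    (g := fun acc d => acc ++ pvTop d)
    (l := (PySem.Dict.ofList word_count).values) (init := ([] : List Int)) hbody
  rw [hfold, PySem.List.foldl_append_eq_flatMap]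
  simp

theorem pv_spec (word_count : List (String × List (String × Int))) :
    get_freq_range word_count = get_freq_range_alt word_count := by
  rw [pv_A_eq]
  unfold get_freq_range_alt
  simp only
  have hlast : ∀ d : List (String × Int),
      (PySem.List.pyGet?
        (PySem.List.slice
          (PySem.List.sorted (PySem.Dict.values (PySem.Dict.ofList d)) (fun x => x) true)
          none (some 10)) (-1)).getD 0 = (pvTop d).getLast?.getD 0 := by
    intro d
    rw [PySem.List.slice_to _ (by norm_num), PySem.List.pyGet?_neg_one]
    rfl
  congr 1
  · -- min side
    apply congrArg (fun o => Option.getD o 0)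
    apply pv_min_congr
    · -- x in flatMap top -> some min-candidate ≤ x
      intro x hx
      obtain ⟨d, hd, hxd⟩ := List.mem_flatMap.mp hx
      have hdne : d ≠ [] := by
        rintro rfl
        simp [pvTop, pvSvals, PySem.Dict.ofList, PySem.Dict.update, PySem.Dict.empty,
          PySem.Dict.values] at hxd
        exact absurd hxd (by simp [PySem.List.sorted])
      refine ⟨(pvTop d).getLast?.getD 0, ?_, pv_getLast_le _ (pvTop_pairwise d) x hxd⟩
      rw [List.mem_map]
      exact ⟨d, by simp [List.mem_filter, hd, hdne], (hlast d).symm ▸ rfl⟩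
    · -- each min-candidate has a witness in flatMap top
      intro y hy
      obtain ⟨d, hd, hyd⟩ := List.mem_map.mp hy
      have hdmem := (List.mem_filter.mp hd).1
      have hdne : d ≠ [] := by
        have := (List.mem_filter.mp hd).2
        simpa using this
      have htne := pvTop_ne_nil d hdne
      have hmem : (pvTop d).getLast?.getD 0 ∈ pvTop d := by
        cases hl : (pvTop d).getLast? with
        | none => exact absurd (List.getLast?_eq_none_iff.mp hl) htne
        | some a => simpa using List.mem_of_getLast? hl
      refine ⟨(pvTop d).getLast?.getD 0, List.mem_flatMap.mpr ⟨d, hdmem, hmem⟩, ?_⟩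
      rw [← hyd, hlast d]
  · -- max side
    apply congrArg (fun o => Option.getD o 0)
    apply pv_max_congr
    · intro x hx
      obtain ⟨d, hd, hxd⟩ := List.mem_flatMap.mp hx
      exact ⟨x, List.mem_flatMap.mpr ⟨d, hd, pvTop_subset d x hxd⟩, le_refl x⟩
    · intro y hy
      obtain ⟨d, hd, hyd⟩ := List.mem_flatMap.mp hy
      have hvne : (PySem.Dict.ofList d).values ≠ [] := by
        rintro hv
        rw [hv] at hyd
        exact absurd hyd (by simp)
      have hsne : pvSvals d ≠ [] := by
        simpa [pvSvals, PySem.List.sorted_eq_nil_iff] using hvne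
      obtain ⟨m, t, hmt⟩ := List.exists_cons_of_ne_nil hsne
      have hmax := PySem.List.key_head_sorted_rev_ge (PySem.Dict.ofList d).values (fun x : Int => x) hmt y hyd
      have hmtop : m ∈ pvTop d := by simp [pvTop, hmt]
      exact ⟨m, List.mem_flatMap.mpr ⟨d, hd, hmtop⟩, hmax⟩

-- ===== VERDICT (by name: the statement is the Claim_ definition above) =====
theorem get_freq_range_spec : Claim_equal_get_freq_range := by
  intro word_count _ _
  show get_freq_range word_count = get_freq_range_alt word_count
  exact pv_spec word_count
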